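-- pv_equiv track=rewrite | github.com/andrecianflone/tom | language/data.py | split_dict_label
-- ===== SOURCE A (Python) =====
-- def split_dict_label(d, shuffle=False):
--     """
--     Looks for "train/dev/test" label and splits accordingly
--     """
--     train = {}
--     valid = {}
--     test = {}
--     for idkey, story in d.items():
--         if story["partition"] == 'train':
--             train[idkey] = story
--         elif story["partition"] == 'dev':
--             valid[idkey] = story
--         elif story["partition"] == 'test':
--             test[idkey] = story
--         else:
--             ValueError("story partition is not train/dev/test")
--     return train, valid, test
-- ===== SOURCE B (Python) =====
-- def split_dict_label(d, shuffle=False):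
--     """
--     Looks for "train/dev/test" label and splits accordingly
--     """
--     train = {k: v for k, v in d.items() if v["partition"] == 'train'}
--     valid = {k: v for k, v in d.items() if v["partition"] == 'dev'}
--     test = {k: v for k, v in d.items() if v["partition"] == 'test'}
--     return train, valid, test
-- ===== Notes on version B (the rewrite author's own statement) =====
-- stated objective: idiomatic
-- what changed: Replaces A's single loop that dispatches each item into one of three mutable accumulators with three independent filtering dict comprehensions, one per partition label. Pre_ excludes association lists with a duplicate outer key (impossible for a Python dict, where later pairs silently overwrite) and stories lacking a 'partition' key (A raises KeyError there).
import Mathlib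
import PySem

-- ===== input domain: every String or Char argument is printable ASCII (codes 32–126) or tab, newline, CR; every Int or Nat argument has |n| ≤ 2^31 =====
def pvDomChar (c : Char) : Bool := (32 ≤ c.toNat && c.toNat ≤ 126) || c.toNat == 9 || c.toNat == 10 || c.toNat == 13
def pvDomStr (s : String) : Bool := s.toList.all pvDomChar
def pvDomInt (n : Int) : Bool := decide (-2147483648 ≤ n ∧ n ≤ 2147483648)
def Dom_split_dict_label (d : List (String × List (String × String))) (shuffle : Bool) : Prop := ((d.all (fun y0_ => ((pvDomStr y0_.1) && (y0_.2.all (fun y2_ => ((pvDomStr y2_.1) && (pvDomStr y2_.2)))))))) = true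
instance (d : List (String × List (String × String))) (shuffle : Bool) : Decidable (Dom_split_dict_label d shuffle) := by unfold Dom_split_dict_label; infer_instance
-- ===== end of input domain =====

-- B replaces A's single dispatching loop over three mutable dicts by three independent
-- filtering dict comprehensions (one per label); same O(n) cost, more idiomatic.


-- story["partition"]: first-match lookup in the inner association list (exact for a
-- Python dict, whose keys are unique); none = KeyError, excluded by Pre_.
def pvPartitionOf (story : List (String × String)) : Option String :=
  (story.find? (fun kv => kv.1 == "partition")).map (·.2)

-- ===== PORT A =====
-- A's loop over d.items(), dispatching into three dicts; the result dicts as item lists.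
def split_dict_label (d : List (String × List (String × String))) (shuffle : Bool) : (List (String × List (String × String))) × (List (String × List (String × String))) × (List (String × List (String × String))) :=
  let r := d.foldl
    (fun (acc : PySem.Dict String (List (String × String)) × PySem.Dict String (List (String × String)) × PySem.Dict String (List (String × String))) kv =>
      match pvPartitionOf kv.2 with
      | none => acc  -- KeyError in Python; unreachable under Pre_
      | some p =>
        if p = "train" then (acc.1.insert kv.1 kv.2, acc.2.1, acc.2.2)
        else if p = "dev" then (acc.1, acc.2.1.insert kv.1 kv.2, acc.2.2)
        else if p = "test" then (acc.1, acc.2.1, acc.2.2.insert kv.1 kv.2)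
        else acc)  -- A's bare 'ValueError(...)' raises nothing: the item is dropped
    (PySem.Dict.empty, PySem.Dict.empty, PySem.Dict.empty)
  (r.1.items, r.2.1.items, r.2.2.items)

-- ===== PORT B =====
-- three independent dict comprehensions, one scan each
def split_dict_label_alt (d : List (String × List (String × String))) (shuffle : Bool) : (List (String × List (String × String))) × (List (String × List (String × String))) × (List (String × List (String × String))) :=
  (d.filter (fun kv => pvPartitionOf kv.2 == some "train"),
   d.filter (fun kv => pvPartitionOf kv.2 == some "dev"),
   d.filter (fun kv => pvPartitionOf kv.2 == some "test"))

-- ===== PRECONDITION & SPEC =====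
-- Pre_ excludes association lists with a duplicate outer key (impossible for a Python
-- dict, where later pairs silently overwrite) and stories lacking a "partition" key
-- (A raises KeyError there).
def Pre_split_dict_label (d : List (String × List (String × String))) (shuffle : Bool) : Prop :=
  (d.map Prod.fst).Nodup ∧ ∀ kv ∈ d, "partition" ∈ kv.2.map Prod.fst
instance (d : List (String × List (String × String))) (shuffle : Bool) : Decidable (Pre_split_dict_label d shuffle) := by unfold Pre_split_dict_label; infer_instance
def pvWitness_split_dict_label : (List (String × List (String × String))) × Bool :=
  ([("a", [("partition", "train")]), ("b", [("partition", "dev")])], false)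

def Spec_split_dict_label (d : List (String × List (String × String))) (shuffle : Bool) (out : (List (String × List (String × String))) × (List (String × List (String × String))) × (List (String × List (String × String)))) : Prop := out = split_dict_label_alt d shuffle
instance (d : List (String × List (String × String))) (shuffle : Bool) (out : (List (String × List (String × String))) × (List (String × List (String × String))) × (List (String × List (String × String)))) : Decidable (Spec_split_dict_label d shuffle out) := by unfold Spec_split_dict_label; infer_instance

-- ===== CLAIM (what is proved, stated in full; the proofs are below) =====
def Claim_equal_split_dict_label : Prop := ∀ (d : List (String × List (String × String))) (shuffle : Bool), Dom_split_dict_label d shuffle → Pre_split_dict_label d shuffle → Spec_split_dict_label d shuffle (split_dict_label d shuffle)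

-- ===== LEMMAS AND PROOFS =====

-- Loop invariant: A's fold, started from dicts whose keys are disjoint from the
-- remaining (distinct) keys of l, appends to each dict's items exactly the items
-- B's corresponding filter selects from l.
lemma pv_loop_eq (l : List (String × List (String × String)))
    (t v w : PySem.Dict String (List (String × String)))
    (hnd : (l.map Prod.fst).Nodup)
    (ht : ∀ p ∈ l, t.contains p.1 = false)
    (hv : ∀ p ∈ l, v.contains p.1 = false)
    (hw : ∀ p ∈ l, w.contains p.1 = false)
    (hkey : ∀ p ∈ l, (pvPartitionOf p.2).isSome) :
    (l.foldl
      (fun (acc : PySem.Dict String (List (String × String)) × PySem.Dict String (List (String × String)) × PySem.Dict String (List (String × String))) kv =>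
        match pvPartitionOf kv.2 with
        | none => acc
        | some p =>
          if p = "train" then (acc.1.insert kv.1 kv.2, acc.2.1, acc.2.2)
          else if p = "dev" then (acc.1, acc.2.1.insert kv.1 kv.2, acc.2.2)
          else if p = "test" then (acc.1, acc.2.1, acc.2.2.insert kv.1 kv.2)
          else acc)
      (t, v, w)) =
    (PySem.Dict.mk (t.items ++ l.filter (fun kv => pvPartitionOf kv.2 == some "train")),
     PySem.Dict.mk (v.items ++ l.filter (fun kv => pvPartitionOf kv.2 == some "dev")),
     PySem.Dict.mk (w.items ++ l.filter (fun kv => pvPartitionOf kv.2 == some "test"))) := by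
  induction l generalizing t v w with
  | nil =>
    simp [List.foldl]
  | cons kv rest ih =>
    rw [List.map_cons] at hnd
    have hk : kv.1 ∉ rest.map Prod.fst := (List.nodup_cons.mp hnd).1
    have hnd' : (rest.map Prod.fst).Nodup := (List.nodup_cons.mp hnd).2
    have fresh : ∀ (dct : PySem.Dict String (List (String × String))),
        (∀ p ∈ rest, dct.contains p.1 = false) →
        ∀ p ∈ rest, (dct.insert kv.1 kv.2).contains p.1 = false := by
      intro dct hd p hp
      rw [PySem.Dict.contains_insert]
      have hne : p.1 ≠ kv.1 := fun h => hk (h ▸ List.mem_map_of_mem hp)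
      simp [hne, hd p hp]
    have ht0 := ht kv (by simp)
    have hv0 := hv kv (by simp)
    have hw0 := hw kv (by simp)
    have ht' : ∀ p ∈ rest, t.contains p.1 = false := fun p hp => ht p (by simp [hp])
    have hv' : ∀ p ∈ rest, v.contains p.1 = false := fun p hp => hv p (by simp [hp])
    have hw' : ∀ p ∈ rest, w.contains p.1 = false := fun p hp => hw p (by simp [hp])
    have hkey' : ∀ p ∈ rest, (pvPartitionOf p.2).isSome := fun p hp => hkey p (by simp [hp])
    rw [List.foldl_cons]
    cases hpo : pvPartitionOf kv.2 with
    | none => exact absurd (hpo ▸ hkey kv (by simp)) (by simp)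
    | some pl =>
      by_cases h1 : pl = "train"
      · subst h1
        simp only [reduceIte]
        rw [ih (t.insert kv.1 kv.2) v w hnd' (fresh t ht') hv' hw' hkey',
            PySem.Dict.items_insert_of_not_contains _ _ ht0]
        simp [hpo]
      · by_cases h2 : pl = "dev"
        · subst h2
          simp only [reduceIte]
          rw [if_neg (show ("dev":String) ≠ "train" by decide)]
          rw [ih t (v.insert kv.1 kv.2) w hnd' ht' (fresh v hv') hw' hkey',
              PySem.Dict.items_insert_of_not_contains _ _ hv0]
          simp [hpo]
        · by_cases h3 : pl = "test"
          · subst h3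
            simp only [reduceIte]
            rw [if_neg (show ("test":String) ≠ "train" by decide),
                if_neg (show ("test":String) ≠ "dev" by decide)]
            rw [ih t v (w.insert kv.1 kv.2) hnd' ht' hv' (fresh w hw') hkey',
                PySem.Dict.items_insert_of_not_contains _ _ hw0]
            simp [hpo]
          · simp only [if_neg h1, if_neg h2, if_neg h3]
            rw [ih t v w hnd' ht' hv' hw' hkey']
            simp [hpo, h1, h2, h3]

theorem pv_main (d : List (String × List (String × String))) (shuffle : Bool)
    (h : Pre_split_dict_label d shuffle) :
    split_dict_label d shuffle = split_dict_label_alt d shuffle := by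
  obtain ⟨hnd, hkey⟩ := h
  have hkey' : ∀ p ∈ d, (pvPartitionOf p.2).isSome := by
    intro p hp
    have := hkey p hp
    simp only [pvPartitionOf, Option.isSome_map]
    rcases List.mem_map.mp this with ⟨q, hq, hq1⟩
    have : (List.find? (fun kv => kv.1 == "partition") p.2).isSome :=
      List.find?_isSome.mpr ⟨q, hq, by simp [hq1]⟩
    simpa using this
  unfold split_dict_label split_dict_label_alt
  rw [pv_loop_eq d PySem.Dict.empty PySem.Dict.empty PySem.Dict.empty hnd
      (by intro p _; simp [PySem.Dict.contains_empty]) (by intro p _; simp [PySem.Dict.contains_empty])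
      (by intro p _; simp [PySem.Dict.contains_empty]) hkey']
  rfl

-- ===== VERDICT (by name: the statement is the Claim_ definition above) =====
theorem split_dict_label_spec : Claim_equal_split_dict_label := by
  intro d shuffle _ hpre
  exact pv_main d shuffle hpre
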